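-- pv_equiv track=rewrite | github.com/ondrejklejch/material-asr | nbest/print_nbest.py | compute_current_sausage_length
-- ===== SOURCE A (Python) =====
-- def compute_current_sausage_length(utt, best_path):
--     current_sausage_length = 0
--     for word in utt:
--         while best_path[current_sausage_length] == 0:
--             current_sausage_length += 1
--
--         current_sausage_length += 1
--
--         while current_sausage_length < len(best_path) and best_path[current_sausage_length] == 0:
--             current_sausage_length += 1
--
--     return current_sausage_length
-- ===== SOURCE B (Python) =====
-- def compute_current_sausage_length(utt, best_path):
--     # Index table of non-zero positions, then one direct lookup:
--     # after consuming n words the pointer sits just past the n-th non-zero,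
--     # advanced over trailing zeros (but not past the end).
--     nonzeros = [i for i, v in enumerate(best_path) if v != 0]
--     n = sum(1 for _ in utt)
--     if n == 0:
--         return 0
--     pos = nonzeros[n - 1] + 1  # IndexError here iff A's first while loop would
--     while pos < len(best_path) and best_path[pos] == 0:
--         pos += 1
--     return pos
-- ===== Notes on version B (the rewrite author's own statement) =====
-- stated objective: simpler
-- what changed: Replaces A's per-word nested pointer-walk (two inner while loops per word) with one precomputed table of non-zero indices, a single lookup nonzeros[n-1]+1, and one trailing zero-skip; like A it raises IndexError when utt has more words than best_path has non-zero entries.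
import Mathlib
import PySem

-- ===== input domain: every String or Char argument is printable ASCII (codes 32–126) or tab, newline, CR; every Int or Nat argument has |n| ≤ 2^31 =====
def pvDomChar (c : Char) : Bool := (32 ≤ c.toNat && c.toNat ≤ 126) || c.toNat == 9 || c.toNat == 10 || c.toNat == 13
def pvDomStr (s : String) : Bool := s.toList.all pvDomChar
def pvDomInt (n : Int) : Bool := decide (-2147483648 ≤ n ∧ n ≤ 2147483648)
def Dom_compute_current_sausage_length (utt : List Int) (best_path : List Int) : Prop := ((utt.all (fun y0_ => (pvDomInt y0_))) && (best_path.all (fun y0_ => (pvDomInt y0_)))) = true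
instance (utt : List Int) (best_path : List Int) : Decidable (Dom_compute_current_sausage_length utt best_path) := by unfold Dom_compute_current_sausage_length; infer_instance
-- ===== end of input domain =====

-- B replaces A's per-word nested pointer-walk with a precomputed table of
-- non-zero indices, one direct lookup and one trailing zero-skip (objective: simpler).

-- ===== PORT A =====
-- Both of A's inner 'while' loops advance the pointer over zeros; the first one
-- raises IndexError when it runs past the end (those inputs are outside Pre_),
-- modelled here by stopping at best_path.length.
def skipZeros (bp : List Int) (pos : Nat) : Nat :=
  if _h : pos < bp.length then
    if bp.getD pos 0 == 0 then skipZeros bp (pos + 1) else pos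
  else pos
termination_by bp.length - pos

def compute_current_sausage_length (utt : List Int) (best_path : List Int) : Int :=
  ((utt.foldl (fun current_sausage_length _ =>
      let c1 := skipZeros best_path current_sausage_length  -- first while
      let c2 := c1 + 1                                      -- current_sausage_length += 1
      skipZeros best_path c2                                -- second while
    ) 0 : Nat) : Int)

-- ===== PORT B =====
-- Source B's trailing 'while pos < len(best_path) and best_path[pos] == 0' loop.
def skipTrail (bp : List Int) (pos : Nat) : Nat :=
  if _h : pos < bp.length then
    if bp.getD pos 0 == 0 then skipTrail bp (pos + 1) else pos
  else pos
termination_by bp.length - pos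

def compute_current_sausage_length_alt (utt : List Int) (best_path : List Int) : Int :=
  let nonzeros : List Int :=
    ((PySem.List.enumerate best_path 0).filter (fun p => decide (p.2 ≠ 0))).map Prod.fst
  let n : Int := utt.foldl (fun a _ => a + 1) 0             -- sum(1 for _ in utt)
  if n = 0 then 0
  else
    -- nonzeros[n-1] raises IndexError outside Pre_; inside Pre_ the index is in range
    let pos : Int := PySem.List.pyGetD nonzeros (n - 1) 0 + 1
    (skipTrail best_path pos.toNat : Int)

-- ===== PRECONDITION & SPEC =====
-- A raises IndexError (its first unbounded while loop runs off the end) exactly when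
-- utt has more words than best_path has non-zero entries; B raises there too
-- (nonzeros[n-1] is out of range), so those inputs lie outside Pre_.
def Pre_compute_current_sausage_length (utt : List Int) (best_path : List Int) : Prop :=
  utt.length ≤ best_path.countP (fun v => decide (v ≠ 0))
instance (utt : List Int) (best_path : List Int) : Decidable (Pre_compute_current_sausage_length utt best_path) := by unfold Pre_compute_current_sausage_length; infer_instance

def pvWitness_compute_current_sausage_length : List Int × List Int := ([1], [0, 5, 0])

def Spec_compute_current_sausage_length (utt : List Int) (best_path : List Int) (out : Int) : Prop := out = compute_current_sausage_length_alt utt best_path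
instance (utt : List Int) (best_path : List Int) (out : Int) : Decidable (Spec_compute_current_sausage_length utt best_path out) := by unfold Spec_compute_current_sausage_length; infer_instance

-- ===== CLAIM (what is proved, stated in full; the proofs are below) =====
def Claim_equal_compute_current_sausage_length : Prop := ∀ (utt : List Int) (best_path : List Int), Dom_compute_current_sausage_length utt best_path → Pre_compute_current_sausage_length utt best_path → Spec_compute_current_sausage_length utt best_path (compute_current_sausage_length utt best_path)

-- ===== LEMMAS AND PROOFS =====

lemma skipTrail_eq (bp : List Int) (pos : Nat) : skipTrail bp pos = skipZeros bp pos := by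
  rw [skipTrail, skipZeros]
  split
  · split
    · exact skipTrail_eq bp (pos + 1)
    · rfl
  · rfl
termination_by bp.length - pos

-- cp bp r = number of non-zero entries among the first r entries of bp
def cp (bp : List Int) (r : Nat) : Nat := (bp.take r).countP (fun v => decide (v ≠ 0))

lemma cp_mono (bp : List Int) {r1 r2 : Nat} (h : r1 ≤ r2) : cp bp r1 ≤ cp bp r2 := by
  have h1 : bp.take r1 = (bp.take r2).take r1 := by
    rw [List.take_take, Nat.min_eq_left h]
  rw [cp, cp, h1]
  exact (List.take_sublist _ _).countP_le

lemma cp_succ (bp : List Int) {r : Nat} (h : r < bp.length) :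
    cp bp (r + 1) = cp bp r + (if bp.getD r 0 ≠ 0 then 1 else 0) := by
  rw [cp, cp, List.take_add_one, List.countP_append, List.getElem?_eq_getElem h,
    List.getD_eq_getElem bp 0 h]
  simp [Option.toList]

lemma cp_length (bp : List Int) : cp bp bp.length = bp.countP (fun v => decide (v ≠ 0)) := by
  rw [cp, List.take_length]

lemma skip_props (bp : List Int) (cur : Nat) (hc : cur ≤ bp.length) :
    cur ≤ skipZeros bp cur ∧ skipZeros bp cur ≤ bp.length ∧
    cp bp (skipZeros bp cur) = cp bp cur ∧
    (skipZeros bp cur < bp.length → bp.getD (skipZeros bp cur) 0 ≠ 0) := by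
  rw [skipZeros]
  split
  · rename_i hlt
    split
    · rename_i hz
      have ih := skip_props bp (cur + 1) (by omega)
      have hcp : cp bp (cur + 1) = cp bp cur := by
        rw [cp_succ bp hlt]
        simp at hz
        simp [hz]
      exact ⟨by omega, ih.2.1, by rw [ih.2.2.1, hcp], ih.2.2.2⟩
    · rename_i hz
      simp at hz
      exact ⟨le_refl _, by omega, rfl, fun _ => hz⟩
  · exact ⟨le_refl _, by omega, rfl, fun h' => absurd hc (by omega)⟩
termination_by bp.length - cur

-- the invariant A's fold maintains
lemma foldA_inv (bp : List Int) (l : List Int) : ∀ (cur j : Nat),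
    cur ≤ bp.length → cp bp cur = j →
    (0 < j → cur = bp.length ∨ bp.getD cur 0 ≠ 0) →
    j + l.length ≤ bp.countP (fun v => decide (v ≠ 0)) →
    (l.foldl (fun c _ => skipZeros bp (skipZeros bp c + 1)) cur) ≤ bp.length ∧
    cp bp (l.foldl (fun c _ => skipZeros bp (skipZeros bp c + 1)) cur) = j + l.length ∧
    (0 < j + l.length →
      (l.foldl (fun c _ => skipZeros bp (skipZeros bp c + 1)) cur) = bp.length ∨
      bp.getD (l.foldl (fun c _ => skipZeros bp (skipZeros bp c + 1)) cur) 0 ≠ 0) := by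
  induction l with
  | nil => intro cur j h1 h2 h3 h4; simpa using ⟨h1, h2, h3⟩
  | cons a l ih =>
    intro cur j h1 h2 h3 h4
    simp only [List.foldl_cons, List.length_cons] at *
    have hcount : j < bp.countP (fun v => decide (v ≠ 0)) := by omega
    obtain ⟨s1, s2, s3, s4⟩ := skip_props bp cur h1
    set p := skipZeros bp cur with hp
    have hplt : p < bp.length := by
      rcases Nat.lt_or_ge p bp.length with h | h
      · exact h
      · exfalso
        have : p = bp.length := by omega
        rw [this, cp_length] at s3
        omega
    have hpnz : bp.getD p 0 ≠ 0 := s4 hplt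
    have hcp1 : cp bp (p + 1) = j + 1 := by
      rw [cp_succ bp hplt, if_pos hpnz, s3, h2]
    obtain ⟨t1, t2, t3, t4⟩ := skip_props bp (p + 1) (by omega)
    set q := skipZeros bp (p + 1) with hq
    have := ih q (j + 1) t2 (by rw [t3, hcp1])
      (fun _ => by rcases Nat.lt_or_ge q bp.length with h | h
                   · exact Or.inr (t4 h)
                   · exact Or.inl (by omega))
      (by omega)
    refine ⟨this.1, by rw [this.2.1]; omega, fun _ => this.2.2 (by omega)⟩

-- a position with exactly n non-zeros before it, sitting on a non-zero entry or
-- at the end, is unique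
lemma uniq_aux (bp : List Int) {r1 r2 n : Nat} (hlt : r1 < r2) (h2 : r2 ≤ bp.length)
    (c1 : cp bp r1 = n) (c2 : cp bp r2 = n)
    (d1 : r1 = bp.length ∨ bp.getD r1 0 ≠ 0) : False := by
  have hr1 : r1 < bp.length := by omega
  have hnz : bp.getD r1 0 ≠ 0 := by
    rcases d1 with h | h
    · omega
    · exact h
  have hstep := cp_succ bp hr1
  rw [if_pos hnz] at hstep
  have hmono := cp_mono bp (show r1 + 1 ≤ r2 by omega)
  omega

lemma uniq (bp : List Int) {r1 r2 n : Nat} (h1 : r1 ≤ bp.length) (h2 : r2 ≤ bp.length)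
    (c1 : cp bp r1 = n) (c2 : cp bp r2 = n)
    (d1 : r1 = bp.length ∨ bp.getD r1 0 ≠ 0)
    (d2 : r2 = bp.length ∨ bp.getD r2 0 ≠ 0) : r1 = r2 := by
  rcases Nat.lt_trichotomy r1 r2 with h | h | h
  · exact absurd (uniq_aux bp h h2 c1 c2 d1) (by simp)
  · exact h
  · exact absurd (uniq_aux bp h h1 c2 c1 d2) (by simp)

-- B's table of non-zero indices, with a general enumerate start
def nzs (bp : List Int) (s : Int) : List Int :=
  ((PySem.List.enumerate bp s).filter (fun p => decide (p.2 ≠ 0))).map Prod.fst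

lemma nzs_cons (x : Int) (xs : List Int) (s : Int) :
    nzs (x :: xs) s = (if x ≠ 0 then [s] else []) ++ nzs xs (s + 1) := by
  by_cases hx : x = 0 <;> simp [nzs, PySem.List.enumerate_cons, hx]

lemma nzs_length (bp : List Int) : ∀ s : Int,
    (nzs bp s).length = bp.countP (fun v => decide (v ≠ 0)) := by
  induction bp with
  | nil => intro s; simp [nzs, PySem.List.enumerate_nil]
  | cons x xs ih =>
    intro s
    rw [nzs_cons, List.length_append, ih (s + 1), List.countP_cons]
    by_cases hx : x = 0
    · simp [hx]
    · simp [hx]; omega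

lemma nzs_get (bp : List Int) : ∀ (s : Int) (j : Nat), j < (nzs bp s).length →
    ∃ k : Nat, (nzs bp s).getD j 0 = s + k ∧ k < bp.length ∧
      bp.getD k 0 ≠ 0 ∧ cp bp k = j := by
  induction bp with
  | nil => intro s j hj; rw [nzs_length] at hj; simp at hj
  | cons x xs ih =>
    intro s j hj
    rw [nzs_cons] at hj ⊢
    by_cases hx : x = 0
    · simp only [hx, ne_eq, not_true_eq_false, if_false, List.nil_append] at hj ⊢
      obtain ⟨k, e1, e2, e3, e4⟩ := ih (s + 1) j hj
      refine ⟨k + 1, by rw [e1]; push_cast; ring, by simpa using e2, by simpa using e3, ?_⟩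
      rw [cp] at e4
      rw [cp, List.take_succ_cons, List.countP_cons, e4]
      simp
    · simp only [hx, ne_eq, not_false_eq_true, if_true, List.cons_append, List.nil_append] at hj ⊢
      match j with
      | 0 =>
        refine ⟨0, by simp, by simp, by simpa using hx, by simp [cp]⟩
      | j + 1 =>
        simp only [List.length_cons, Nat.add_lt_add_iff_right] at hj
        obtain ⟨k, e1, e2, e3, e4⟩ := ih (s + 1) j hj
        refine ⟨k + 1, ?_, by simpa using e2, by simpa using e3, ?_⟩
        · rw [List.getD_cons_succ, e1]; push_cast; ring
        · rw [cp] at e4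
          rw [cp, List.take_succ_cons, List.countP_cons, e4]
          simp [hx]

lemma foldl_count (l : List Int) : ∀ a : Int,
    l.foldl (fun a _ => a + 1) a = a + l.length := by
  induction l with
  | nil => intro a; simp
  | cons x xs ih => intro a; simp [ih]; ring

-- ===== VERDICT (by name: the statement is the Claim_ definition above) =====
theorem compute_current_sausage_length_spec : Claim_equal_compute_current_sausage_length := by
  intro utt bp _ hpre
  unfold Spec_compute_current_sausage_length
  unfold Pre_compute_current_sausage_length at hpre
  simp only [compute_current_sausage_length, compute_current_sausage_length_alt,
    foldl_count utt 0, Int.zero_add]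
  have hA := foldA_inv bp utt 0 0 (by omega) (by simp [cp]) (by omega) (by omega)
  set r := utt.foldl (fun c _ => skipZeros bp (skipZeros bp c + 1)) 0 with hr
  obtain ⟨a1, a2, a3⟩ := hA
  simp only [Nat.zero_add] at a2 a3
  by_cases hn : utt.length = 0
  · rcases List.eq_nil_of_length_eq_zero hn with rfl
    simp
  · have hn0 : ¬ ((utt.length : Int) = 0) := by exact_mod_cast hn
    rw [if_neg hn0]
    -- index n-1 into the table
    have hjlt : utt.length - 1 < (nzs bp 0).length := by
      rw [nzs_length]; omega
    obtain ⟨k, e1, e2, e3, e4⟩ := nzs_get bp 0 (utt.length - 1) hjlt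
    have hidx : ((utt.length : Int) - 1) = ((utt.length - 1 : Nat) : Int) := by omega
    have hpg : PySem.List.pyGetD (((PySem.List.enumerate bp 0).filter (fun p => decide (p.2 ≠ 0))).map Prod.fst) ((utt.length : Int) - 1) 0
        = (nzs bp 0).getD (utt.length - 1) 0 := by
      rw [hidx, nzs, PySem.List.pyGetD_natCast]
    rw [hpg, e1]
    simp only [Int.zero_add]
    have htn : ((k : Int) + 1).toNat = k + 1 := by omega
    rw [htn, skipTrail_eq]
    -- the B-side result q sits at cp = utt.length, on a non-zero or at the end
    have hcpk1 : cp bp (k + 1) = utt.length := by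
      rw [cp_succ bp e2, if_pos e3, e4]; omega
    obtain ⟨t1, t2, t3, t4⟩ := skip_props bp (k + 1) (by omega)
    set q := skipZeros bp (k + 1) with hq
    have hcq : cp bp q = utt.length := by rw [t3, hcpk1]
    have : r = q := uniq bp a1 t2 a2 hcq (a3 (by omega))
      (by rcases Nat.lt_or_ge q bp.length with h | h
          · exact Or.inr (t4 h)
          · exact Or.inl (by omega))
    rw [this]
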